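-- pv_equiv track=rewrite | github.com/akikuno/DAJIN2 | src/DAJIN2/core/report/html_builder.py | highlight_sv_regions
-- ===== SOURCE A (Python) =====
-- def highlight_sv_regions(misdv_sv_allele: list[str]) -> list[str]:
--     """Add an HTML class for a colored underline to regions corresponding to SVs (indels, inversions)."""
--     html_sv_allele = []
--     idx = 0
--     while idx < len(misdv_sv_allele):
--         midsv_tag = misdv_sv_allele[idx]
--
--         # Insertion
--         if midsv_tag.startswith("+"):
--             html_sv_allele.append("<span class='Ins_Allele'>")
--             insertions, last_tag = midsv_tag.split("|")[:-1], midsv_tag.split("|")[-1]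
--             ins_seq = ["=" + ins[1] for ins in insertions]
--             html_sv_allele.extend(ins_seq)
--             html_sv_allele.append("</span>")
--             # If a deletion occurs immediately after an insertion, close the insertion span and open the deletion span.
--             if last_tag.startswith("-"):
--                 html_sv_allele.append("<span class='Del_Allele'>")
--                 html_sv_allele.append(last_tag)
--                 html_sv_allele.append("</span><!-- END_OF_DEL_ALLELE -->")
--             else:  # match or substitution
--                 html_sv_allele.append(last_tag)
--
--         # Deletion
--         elif midsv_tag.startswith("-"):
--             html_sv_allele.append("<span class='Del_Allele'>")
--             html_sv_allele.append(misdv_sv_allele[idx])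
--             # Enclose consecutive deletions within a single span.
--             while idx < len(misdv_sv_allele) - 1 and misdv_sv_allele[idx + 1].startswith("-"):
--                 html_sv_allele.append(misdv_sv_allele[idx + 1])
--                 idx += 1
--             html_sv_allele.append("</span><!-- END_OF_DEL_ALLELE -->")
--
--         # Inversion
--         elif midsv_tag.islower():
--             html_sv_allele.append("<span class='Inv_Allele'>")
--             # Enclose consecutive inversion within a single span.
--             html_sv_allele.append(midsv_tag)
--             while idx < len(misdv_sv_allele) - 1 and misdv_sv_allele[idx + 1].islower():
--                 html_sv_allele.append(misdv_sv_allele[idx + 1])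
--                 idx += 1
--             html_sv_allele.append("</span>")
--
--         # No SV
--         else:
--             html_sv_allele.append(midsv_tag)
--
--         idx += 1
--
--     return html_sv_allele
-- ===== SOURCE B (Python) =====
-- def highlight_sv_regions(misdv_sv_allele: list[str]) -> list[str]:
--     """Group-then-render: one fold groups consecutive tags into runs, a second pass renders each run."""
--     INS, DEL, INV, OTHER = 0, 1, 2, 3
--
--     def kind(tag):
--         if tag.startswith("+"):
--             return INS
--         if tag.startswith("-"):
--             return DEL
--         if tag.islower():
--             return INV
--         return OTHER
--
--     def extends(k, tag):
--         if k == DEL: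
--             return tag.startswith("-")
--         if k == INV:
--             return tag.islower()
--         return False
--
--     groups = []
--     for tag in misdv_sv_allele:
--         if groups and extends(groups[-1][0], tag):
--             groups[-1][1].append(tag)
--         else:
--             groups.append((kind(tag), [tag]))
--
--     out = []
--     for k, run in groups:
--         if k == INS:
--             for tag in run:
--                 out.append("<span class='Ins_Allele'>")
--                 parts = tag.split("|")
--                 out.extend("=" + ins[1] for ins in parts[:-1])
--                 out.append("</span>")
--                 last_tag = parts[-1]
--                 if last_tag.startswith("-"):
--                     out.extend(["<span class='Del_Allele'>", last_tag,
--                                 "</span><!-- END_OF_DEL_ALLELE -->"])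
--                 else:
--                     out.append(last_tag)
--         elif k == DEL:
--             out.append("<span class='Del_Allele'>")
--             out.extend(run)
--             out.append("</span><!-- END_OF_DEL_ALLELE -->")
--         elif k == INV:
--             out.append("<span class='Inv_Allele'>")
--             out.extend(run)
--             out.append("</span>")
--         else:
--             out.extend(run)
--     return out
-- ===== Notes on version B (the rewrite author's own statement) =====
-- stated objective: alternative
-- what changed: Replaces A's index/while scan with look-ahead by a two-phase pass: a fold that groups consecutive tags into (kind, run) runs by looking at the current run's kind, then a render pass that emits each run's span block.
-- outside the precondition, e.g. on highlight_sv_regions(['+|a']): A raises IndexError, B raises IndexError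
import Mathlib
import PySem

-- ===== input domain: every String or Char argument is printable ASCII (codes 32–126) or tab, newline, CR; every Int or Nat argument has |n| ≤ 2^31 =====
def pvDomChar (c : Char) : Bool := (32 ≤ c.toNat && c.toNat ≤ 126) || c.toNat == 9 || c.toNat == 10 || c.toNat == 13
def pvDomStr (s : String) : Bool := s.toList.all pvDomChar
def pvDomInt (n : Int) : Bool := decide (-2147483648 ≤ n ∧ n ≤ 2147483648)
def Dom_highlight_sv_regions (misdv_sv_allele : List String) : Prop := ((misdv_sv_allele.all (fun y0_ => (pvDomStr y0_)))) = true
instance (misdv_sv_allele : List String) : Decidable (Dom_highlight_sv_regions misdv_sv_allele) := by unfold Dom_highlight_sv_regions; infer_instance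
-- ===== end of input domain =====

-- B groups consecutive tags into (kind, run) runs with a fold, then renders each run; same output as A's
-- index/while scan (equivalence is about the return value; neither program mutates its argument).

-- s.islower(): at least one cased character and no uppercase one — exact on the ASCII domain,
-- where the cased characters are exactly the letters.  Shared by both ports (both Pythons call str.islower).
def pyIslower (s : String) : Bool :=
  s.toList.any PySem.Chars.islower && s.toList.all (fun c => !PySem.Chars.isupper c)

-- "=" + ins[1]; the `none` branch (ins[1] raises IndexError) is excluded by Pre_.  Shared: the expression
-- is identical in both Pythons.
def insSeqElem (ins : String) : String :=
  match PySem.List.pyGet? ins.toList 1 with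
  | some c => String.ofList ['=', c]
  | none => ""

-- ===== PORT A =====
def goA : List String → List String
  | [] => []
  | t :: rest =>
    if PySem.Str.startswith t "+" then
      let parts := (PySem.Str.split? t "|").getD []
      ["<span class='Ins_Allele'>"] ++ (List.dropLast parts).map insSeqElem ++ ["</span>"] ++
      (let last_tag := List.getLastD parts ""
       if PySem.Str.startswith last_tag "-" then
         ["<span class='Del_Allele'>", last_tag, "</span><!-- END_OF_DEL_ALLELE -->"]
       else [last_tag]) ++ goA rest
    else if PySem.Str.startswith t "-" then
      ["<span class='Del_Allele'>", t] ++ rest.takeWhile (fun x => PySem.Str.startswith x "-") ++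
      ["</span><!-- END_OF_DEL_ALLELE -->"] ++ goA (rest.dropWhile (fun x => PySem.Str.startswith x "-"))
    else if pyIslower t then
      ["<span class='Inv_Allele'>", t] ++ rest.takeWhile pyIslower ++ ["</span>"] ++
      goA (rest.dropWhile pyIslower)
    else t :: goA rest
termination_by l => l.length
decreasing_by
  · simp only [List.length_cons]; omega
  · simp only [List.length_cons]
    exact Nat.lt_succ_of_le (List.length_dropWhile_le _ rest)
  · simp only [List.length_cons]
    exact Nat.lt_succ_of_le (List.length_dropWhile_le _ rest)
  · simp only [List.length_cons]; omega

def highlight_sv_regions (misdv_sv_allele : List String) : List String := goA misdv_sv_allele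

-- ===== PORT B =====
-- kinds: 0 = ins, 1 = del, 2 = inv, 3 = other
def kindOf (t : String) : Nat :=
  if PySem.Str.startswith t "+" then 0
  else if PySem.Str.startswith t "-" then 1
  else if pyIslower t then 2
  else 3

def extendsRun (k : Nat) (t : String) : Bool :=
  if k = 1 then PySem.Str.startswith t "-"
  else if k = 2 then pyIslower t
  else false

def pushTag (groups : List (Nat × List String)) (t : String) : List (Nat × List String) :=
  match groups.getLast? with
  | some g => if extendsRun g.1 t then groups.dropLast ++ [(g.1, g.2 ++ [t])]
              else groups ++ [(kindOf t, [t])]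
  | none => [(kindOf t, [t])]

def renderIns (t : String) : List String :=
  let parts := (PySem.Str.split? t "|").getD []
  ["<span class='Ins_Allele'>"] ++ (List.dropLast parts).map insSeqElem ++ ["</span>"] ++
  (let last_tag := List.getLastD parts ""
   if PySem.Str.startswith last_tag "-" then
     ["<span class='Del_Allele'>", last_tag, "</span><!-- END_OF_DEL_ALLELE -->"]
   else [last_tag])

def renderGroup (g : Nat × List String) : List String :=
  if g.1 = 0 then g.2.flatMap renderIns
  else if g.1 = 1 then "<span class='Del_Allele'>" :: g.2 ++ ["</span><!-- END_OF_DEL_ALLELE -->"]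
  else if g.1 = 2 then "<span class='Inv_Allele'>" :: g.2 ++ ["</span>"]
  else g.2

def highlight_sv_regions_alt (misdv_sv_allele : List String) : List String :=
  (misdv_sv_allele.foldl pushTag []).flatMap renderGroup

-- ===== PRECONDITION & SPEC =====
-- Pre_ excludes inputs containing a '+'-tag with a '|'-piece (before the last) shorter than 2 characters:
-- at a run start A's "=" + ins[1] raises IndexError (and B raises the same way); when such a tag is instead
-- absorbed into a preceding inversion run A returns normally and B returns the same value, but the per-tag
-- condition cannot see the position, so those inputs are excluded too.
def Pre_highlight_sv_regions (misdv_sv_allele : List String) : Prop :=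
  ∀ t ∈ misdv_sv_allele, PySem.Str.startswith t "+" = true →
    ∀ p ∈ ((PySem.Str.split? t "|").getD []).dropLast, 2 ≤ p.toList.length

instance (misdv_sv_allele : List String) : Decidable (Pre_highlight_sv_regions misdv_sv_allele) := by
  unfold Pre_highlight_sv_regions; infer_instance

def pvWitness_highlight_sv_regions : List String := ["+A|+C|=G", "-A", "-A", "acgt", "=T"]

def Spec_highlight_sv_regions (misdv_sv_allele : List String) (out : List String) : Prop := out = highlight_sv_regions_alt misdv_sv_allele
instance (misdv_sv_allele : List String) (out : List String) : Decidable (Spec_highlight_sv_regions misdv_sv_allele out) := by unfold Spec_highlight_sv_regions; infer_instance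

-- ===== CLAIM (what is proved, stated in full; the proofs are below) =====
def Claim_equal_highlight_sv_regions : Prop := ∀ (misdv_sv_allele : List String), Dom_highlight_sv_regions misdv_sv_allele → Pre_highlight_sv_regions misdv_sv_allele → Spec_highlight_sv_regions misdv_sv_allele (highlight_sv_regions misdv_sv_allele)

-- ===== LEMMAS AND PROOFS =====

theorem pushTag_concat (gs : List (Nat × List String)) (k : Nat) (run : List String) (t : String) :
    pushTag (gs ++ [(k, run)]) t =
      if extendsRun k t then gs ++ [(k, run ++ [t])] else gs ++ [(k, run)] ++ [(kindOf t, [t])] := by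
  simp [pushTag]

-- the fold only ever touches the last group, so a fixed prefix passes through
theorem foldl_pushTag_prefix (xs : List String) (gs : List (Nat × List String)) (k : Nat) (run : List String) :
    xs.foldl pushTag (gs ++ [(k, run)]) = gs ++ xs.foldl pushTag [(k, run)] := by
  induction xs generalizing gs k run with
  | nil => simp
  | cons x rest ih =>
    simp only [List.foldl_cons]
    rw [pushTag_concat, show pushTag [(k, run)] x = if extendsRun k x then [(k, run ++ [x])]
          else [(k, run)] ++ [(kindOf x, [x])] by simpa using pushTag_concat [] k run x]
    by_cases hx : extendsRun k x = true
    · rw [if_pos hx, if_pos hx]; exact ih gs k (run ++ [x])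
    · rw [if_neg hx, if_neg hx]
      rw [show gs ++ [(k, run)] ++ [(kindOf x, [x])] = (gs ++ [(k, run)]) ++ [(kindOf x, [x])] by simp,
          ih (gs ++ [(k, run)]) (kindOf x) [x], ih [(k, run)] (kindOf x) [x]]
      simp

-- a started run absorbs exactly the extendsRun-prefix of the remaining tags
theorem foldl_pushTag_run (xs : List String) (k : Nat) (run : List String) :
    xs.foldl pushTag [(k, run)] =
      (k, run ++ xs.takeWhile (extendsRun k)) :: (xs.dropWhile (extendsRun k)).foldl pushTag [] := by
  induction xs generalizing run with
  | nil => simp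
  | cons x rest ih =>
    simp only [List.foldl_cons, List.takeWhile_cons, List.dropWhile_cons]
    rw [show pushTag [(k, run)] x = if extendsRun k x then [(k, run ++ [x])]
          else [(k, run)] ++ [(kindOf x, [x])] by simpa using pushTag_concat [] k run x]
    by_cases hx : extendsRun k x = true
    · rw [if_pos hx, hx]
      rw [ih (run ++ [x])]; simp
    · rw [if_neg hx]
      rw [show extendsRun k x = false by simpa using hx]
      rw [foldl_pushTag_prefix rest [(k, run)] (kindOf x) [x]]
      simp [pushTag]

theorem foldl_pushTag_cons (t : String) (rest : List String) :
    (t :: rest).foldl pushTag [] =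
      (kindOf t, t :: rest.takeWhile (extendsRun (kindOf t))) ::
        (rest.dropWhile (extendsRun (kindOf t))).foldl pushTag [] := by
  simp only [List.foldl_cons]
  rw [show pushTag [] t = [(kindOf t, [t])] from rfl, foldl_pushTag_run]
  rfl

theorem extendsRun_ins (x : String) : extendsRun 0 x = false := rfl
theorem extendsRun_other (x : String) : extendsRun 3 x = false := rfl

theorem takeWhile_false {f : String → Bool} (h : ∀ x, f x = false) (l : List String) :
    l.takeWhile f = [] := by
  cases l with
  | nil => rfl
  | cons y ys => simp [h y]

theorem dropWhile_false {f : String → Bool} (h : ∀ x, f x = false) (l : List String) :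
    l.dropWhile f = l := by
  cases l with
  | nil => rfl
  | cons y ys => simp [h y]

theorem goA_eq_render (xs : List String) :
    goA xs = ((xs.foldl pushTag []).flatMap renderGroup) := by
  induction xs using goA.induct with
  | case1 => simp [goA]
  | case2 t rest hplus ih =>
    have hk : kindOf t = 0 := by unfold kindOf; rw [if_pos hplus]
    rw [foldl_pushTag_cons, hk, takeWhile_false extendsRun_ins, dropWhile_false extendsRun_ins]
    rw [goA, if_pos hplus]
    simp only [List.flatMap_cons, ← ih]
    rw [show renderGroup (0, [t]) = renderIns t ++ [] by simp [renderGroup]]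
    simp [renderIns]
  | case3 t rest hplus hminus ih =>
    have hk : kindOf t = 1 := by unfold kindOf; rw [if_neg hplus, if_pos hminus]
    have hext : extendsRun 1 = fun x => PySem.Str.startswith x "-" := funext fun x => rfl
    rw [foldl_pushTag_cons, hk, hext]
    rw [goA, if_neg hplus, if_pos hminus]
    simp only [List.flatMap_cons, ← ih]
    rw [show renderGroup (1, t :: rest.takeWhile (fun x => PySem.Str.startswith x "-")) =
          "<span class='Del_Allele'>" :: (t :: rest.takeWhile (fun x => PySem.Str.startswith x "-")) ++
            ["</span><!-- END_OF_DEL_ALLELE -->"] by simp [renderGroup]]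
    simp
  | case4 t rest hplus hminus hlow ih =>
    have hk : kindOf t = 2 := by unfold kindOf; rw [if_neg hplus, if_neg hminus, if_pos hlow]
    have hext : extendsRun 2 = pyIslower := funext fun x => rfl
    rw [foldl_pushTag_cons, hk, hext]
    rw [goA, if_neg hplus, if_neg hminus, if_pos hlow]
    simp only [List.flatMap_cons, ← ih]
    rw [show renderGroup (2, t :: rest.takeWhile pyIslower) =
          "<span class='Inv_Allele'>" :: (t :: rest.takeWhile pyIslower) ++ ["</span>"] by
      simp [renderGroup]]
    simp
  | case5 t rest hplus hminus hlow ih =>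
    have hk : kindOf t = 3 := by unfold kindOf; rw [if_neg hplus, if_neg hminus, if_neg hlow]
    rw [foldl_pushTag_cons, hk, takeWhile_false extendsRun_other, dropWhile_false extendsRun_other]
    rw [goA, if_neg hplus, if_neg hminus, if_neg hlow]
    simp only [List.flatMap_cons, ← ih]
    rw [show renderGroup (3, [t]) = [t] by simp [renderGroup]]
    simp

-- ===== VERDICT (by name: the statement is the Claim_ definition above) =====
theorem highlight_sv_regions_spec : Claim_equal_highlight_sv_regions := by
  intro xs _ _
  unfold Spec_highlight_sv_regions highlight_sv_regions highlight_sv_regions_alt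
  exact goA_eq_render xs
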